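-- pv_equiv track=rewrite | github.com/parallelno/Vector06c | Vector06c_Dev/_Projects/GameNoname/tools/animSpriteExport.py | SpriteDataBB
-- ===== SOURCE A (Python) =====
-- def SpriteDataBB(bytes1, bytes2, bytes3, w, h, maskBytes = None):
-- 	bytesAll = [bytes1, bytes2, bytes3]
-- 	width = w // 8
-- 	data = []
-- 	for bytes in bytesAll:
-- 		scrBuff = []
-- 		for x in range(width):
-- 			for y in reversed(range(0, h)):
-- 				i = y*width + x
-- 				scrBuff.append(bytes[i])
-- 				if maskBytes:
-- 					scrBuff.append(maskBytes[i])
-- 		data.append(scrBuff)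
-- 	return data
-- ===== SOURCE B (Python) =====
-- def SpriteDataBB(bytes1, bytes2, bytes3, w, h, maskBytes = None):
-- 	width = w // 8
-- 	if width <= 0 or h <= 0:
-- 		return [[], [], []]
-- 	n = width * h
-- 	def cols(bs):
-- 		buff = []
-- 		for x in range(width):
-- 			col = bs[x:n:width][::-1]
-- 			if maskBytes:
-- 				mcol = maskBytes[x:n:width][::-1]
-- 				col = [v for pair in zip(col, mcol) for v in pair]
-- 			buff.extend(col)
-- 		return buff
-- 	return [cols(bytes1), cols(bytes2), cols(bytes3)]
-- ===== Notes on version B (the rewrite author's own statement) =====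
-- stated objective: idiomatic
-- what changed: The inner y-loop with i = y*width + x index arithmetic is replaced by per-column strided slices bs[x : width*h : width][::-1] (and the byte/mask pairs interleaved via a flattened zip), with an early return of three empty buffers for non-positive dimensions.
import Mathlib
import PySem

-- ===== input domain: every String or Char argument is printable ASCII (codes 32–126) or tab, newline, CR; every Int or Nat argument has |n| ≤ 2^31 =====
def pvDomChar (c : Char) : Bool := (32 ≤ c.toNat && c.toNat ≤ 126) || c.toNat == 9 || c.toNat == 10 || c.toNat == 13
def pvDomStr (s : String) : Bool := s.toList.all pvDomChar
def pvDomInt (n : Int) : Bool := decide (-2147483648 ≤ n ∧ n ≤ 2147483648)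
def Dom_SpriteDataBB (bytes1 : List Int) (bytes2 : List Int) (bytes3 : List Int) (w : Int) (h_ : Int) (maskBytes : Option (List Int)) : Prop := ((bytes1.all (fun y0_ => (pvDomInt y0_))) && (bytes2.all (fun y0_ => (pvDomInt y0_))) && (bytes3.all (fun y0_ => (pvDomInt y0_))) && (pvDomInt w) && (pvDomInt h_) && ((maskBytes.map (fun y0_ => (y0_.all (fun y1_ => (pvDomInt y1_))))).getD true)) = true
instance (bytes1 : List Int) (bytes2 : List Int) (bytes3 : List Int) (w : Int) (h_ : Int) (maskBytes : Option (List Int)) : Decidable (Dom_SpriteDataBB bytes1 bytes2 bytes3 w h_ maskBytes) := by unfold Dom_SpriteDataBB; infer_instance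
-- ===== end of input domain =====

-- B replaces the explicit inner y-loop and the i = y*width + x arithmetic by per-column
-- strided slices bs[x : width*h : width][::-1], interleaved with the mask column via zip
-- when a non-empty mask is given (objective: idiomatic; return value only, no mutation).

-- ===== PORT A =====
-- Python truthiness of the maskBytes argument (`if maskBytes:`)
def pvTruthy (maskBytes : Option (List Int)) : Bool :=
  match maskBytes with | some m => !m.isEmpty | none => false

-- the inner y-loop of A (for y in reversed(range(0, h)): …)
def pvAInner (bs : List Int) (maskBytes : Option (List Int)) (maskTruthy : Bool) (width h_ x : Int) (scrBuff : List Int) : List Int :=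
  ((PySem.List.pyRange 0 h_ 1).reverse).foldl (fun scrBuff y =>
    let i := y * width + x
    -- bytes[i] / maskBytes[i]: Pre_ keeps i in range, so the default 0 is never used
    let scrBuff := scrBuff ++ [PySem.List.pyGetD bs i 0]
    if maskTruthy then scrBuff ++ [PySem.List.pyGetD (maskBytes.getD []) i 0] else scrBuff)
    scrBuff

-- the x-loop of A building one scrBuff
def pvABuf (bs : List Int) (maskBytes : Option (List Int)) (maskTruthy : Bool) (width h_ : Int) : List Int :=
  (PySem.List.pyRange 0 width 1).foldl (fun scrBuff x => pvAInner bs maskBytes maskTruthy width h_ x scrBuff) []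

def SpriteDataBB (bytes1 : List Int) (bytes2 : List Int) (bytes3 : List Int) (w : Int) (h_ : Int) (maskBytes : Option (List Int)) : List (List Int) :=
  let width := PySem.Int.floordiv w 8
  -- `if maskBytes:` — truthy iff Some nonempty list
  let maskTruthy := pvTruthy maskBytes
  [bytes1, bytes2, bytes3].foldl (fun data bs => data ++ [pvABuf bs maskBytes maskTruthy width h_]) []

-- ===== PORT B =====
-- [v for pair in zip(col, mcol) for v in pair]
def pvInterleave (xs ys : List Int) : List Int :=
  (xs.zip ys).flatMap (fun p => [p.1, p.2])

-- one column: bs[x:n:width][::-1]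
def pvCol (bs : List Int) (x n width : Int) : List Int :=
  ((PySem.List.slice? bs (some x) (some n) width).getD []).reverse

def pvCols (bs : List Int) (n width : Int) (maskBytes : Option (List Int)) : List Int :=
  (PySem.List.pyRange 0 width 1).foldl (fun buff x =>
    let col := pvCol bs x n width
    let col := match maskBytes with
      | some m => if m.isEmpty then col else pvInterleave col (pvCol m x n width)
      | none => col
    buff ++ col) []

def SpriteDataBB_alt (bytes1 : List Int) (bytes2 : List Int) (bytes3 : List Int) (w : Int) (h_ : Int) (maskBytes : Option (List Int)) : List (List Int) :=
  let width := PySem.Int.floordiv w 8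
  if width ≤ 0 ∨ h_ ≤ 0 then [[], [], []]
  else
    let n := width * h_
    [pvCols bytes1 n width maskBytes, pvCols bytes2 n width maskBytes, pvCols bytes3 n width maskBytes]

-- ===== PRECONDITION & SPEC =====
def pvMaskOk (n : Int) (maskBytes : Option (List Int)) : Bool :=
  match maskBytes with
  | none => true
  | some m => m.isEmpty || decide (n ≤ (m.length : Int))

-- Pre_ excludes exactly the inputs where Python A raises IndexError: when both dimensions are
-- positive, each byte buffer (and a truthy mask) must hold at least (w//8)*h elements.
def Pre_SpriteDataBB (bytes1 : List Int) (bytes2 : List Int) (bytes3 : List Int) (w : Int) (h_ : Int) (maskBytes : Option (List Int)) : Prop :=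
  (0 < PySem.Int.floordiv w 8 ∧ 0 < h_) →
    (PySem.Int.floordiv w 8 * h_ ≤ (bytes1.length : Int) ∧
     PySem.Int.floordiv w 8 * h_ ≤ (bytes2.length : Int) ∧
     PySem.Int.floordiv w 8 * h_ ≤ (bytes3.length : Int) ∧
     pvMaskOk (PySem.Int.floordiv w 8 * h_) maskBytes = true)

instance (bytes1 : List Int) (bytes2 : List Int) (bytes3 : List Int) (w : Int) (h_ : Int) (maskBytes : Option (List Int)) : Decidable (Pre_SpriteDataBB bytes1 bytes2 bytes3 w h_ maskBytes) := by
  unfold Pre_SpriteDataBB; infer_instance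

def pvWitness_SpriteDataBB : List Int × List Int × List Int × Int × Int × Option (List Int) :=
  ([1, 2, 3, 4], [5, 6, 7, 8], [9, 10, 11, 12], 16, 2, some [20, 21, 22, 23])

def Spec_SpriteDataBB (bytes1 : List Int) (bytes2 : List Int) (bytes3 : List Int) (w : Int) (h_ : Int) (maskBytes : Option (List Int)) (out : List (List Int)) : Prop := out = SpriteDataBB_alt bytes1 bytes2 bytes3 w h_ maskBytes
instance (bytes1 : List Int) (bytes2 : List Int) (bytes3 : List Int) (w : Int) (h_ : Int) (maskBytes : Option (List Int)) (out : List (List Int)) : Decidable (Spec_SpriteDataBB bytes1 bytes2 bytes3 w h_ maskBytes out) := by unfold Spec_SpriteDataBB; infer_instance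

-- ===== CLAIM (what is proved, stated in full; the proofs are below) =====
def Claim_equal_SpriteDataBB : Prop := ∀ (bytes1 : List Int) (bytes2 : List Int) (bytes3 : List Int) (w : Int) (h_ : Int) (maskBytes : Option (List Int)), Dom_SpriteDataBB bytes1 bytes2 bytes3 w h_ maskBytes → Pre_SpriteDataBB bytes1 bytes2 bytes3 w h_ maskBytes → Spec_SpriteDataBB bytes1 bytes2 bytes3 w h_ maskBytes (SpriteDataBB bytes1 bytes2 bytes3 w h_ maskBytes)

-- ===== LEMMAS AND PROOFS =====

lemma pv_flatMap_single {α β : Type} (l : List α) (f : α → β) :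
    l.flatMap (fun a => [f a]) = l.map f := by
  induction l with
  | nil => rfl
  | cons a t ih => simp [ih]

lemma pv_flatMap_congr {α β : Type} (l : List α) (f g : α → List β)
    (h : ∀ a ∈ l, f a = g a) : l.flatMap f = l.flatMap g := by
  induction l with
  | nil => rfl
  | cons a t ih => simp_all

lemma pv_interleave_map {α : Type} (l : List α) (g gm : α → Int) :
    pvInterleave (l.map g) (l.map gm) = l.flatMap (fun a => [g a, gm a]) := by
  induction l with
  | nil => rfl
  | cons a t ih => simp_all [pvInterleave]

lemma pv_filterMap_eq_map {α β : Type} (l : List α) (f : α → Option β) (g : α → β)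
    (h : ∀ a ∈ l, f a = some (g a)) : l.filterMap f = l.map g := by
  induction l with
  | nil => rfl
  | cons a t ih => simp_all [List.filterMap_cons]

lemma pv_strided_count (width h_ x : Int) (hw : 0 < width) (hx : 0 ≤ x) (hxw : x < width) :
    (width * h_ - x + width - 1) / width = h_ := by
  have e1 : width * h_ - x + width - 1 = (width - 1 - x) + width * h_ := by ring
  rw [e1, Int.add_mul_ediv_left _ _ (by omega : width ≠ 0),
      Int.ediv_eq_zero_of_lt (by omega) (by omega), zero_add]

lemma pv_pyRange_cast (m : Int) :
    PySem.List.pyRange 0 m 1 = (List.range m.toNat).map (fun (k : Nat) => (k : Int)) := by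
  unfold PySem.List.pyRange
  by_cases hm : 0 < m
  · simp [hm]
  · simp [hm, show m.toNat = 0 by omega]

lemma pv_pyGetD_toNat (bs : List Int) (i : Int) (hi : 0 ≤ i) :
    PySem.List.pyGetD bs i 0 = bs.getD i.toNat 0 := by
  have h := PySem.List.pyGetD_natCast bs i.toNat (0 : Int)
  rw [Int.toNat_of_nonneg hi] at h
  exact h

lemma pv_slice_strided (bs : List Int) (width h_ x : Int)
    (hw : 0 < width) (hh : 0 < h_) (hx : 0 ≤ x) (hxw : x < width)
    (hlen : width * h_ ≤ (bs.length : Int)) :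
    PySem.List.slice? bs (some x) (some (width * h_)) width
      = some ((List.range h_.toNat).map (fun (k : Nat) => bs.getD (x + width * (k : Int)).toNat 0)) := by
  have hwh : width ≤ width * h_ := le_mul_of_one_le_right hw.le (by omega)
  have hxlen : x ≤ (bs.length : Int) := by omega
  have hsi : PySem.List.sliceIndices bs.length (some x) (some (width * h_)) width
      = (x, width * h_, width) := by
    unfold PySem.List.sliceIndices
    simp [show ¬width < 0 by omega, show ¬x < 0 by omega,
          show ¬width * h_ < 0 by nlinarith, min_eq_left hxlen, min_eq_left hlen]
  have hxe : x < width * h_ := by omega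
  unfold PySem.List.slice?
  rw [if_neg (by omega : ¬width = 0), hsi]
  simp only [if_pos hw, if_pos hxe, pv_strided_count width h_ x hw hx hxw]
  refine congrArg some (pv_filterMap_eq_map _ _ _ ?_)
  intro k hk
  have hk' : (k : Int) ≤ h_ - 1 := by
    have := List.mem_range.mp hk
    omega
  have hmul : width * (k : Int) ≤ width * (h_ - 1) :=
    mul_le_mul_of_nonneg_left hk' hw.le
  have hnn : 0 ≤ x + width * (k : Int) := by
    have : 0 ≤ width * (k : Int) := mul_nonneg hw.le (Int.natCast_nonneg k)
    omega
  have hidx : x + width * (k : Int) < (bs.length : Int) := by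
    have e : width * (h_ - 1) = width * h_ - width := by ring
    rw [e] at hmul
    omega
  have hlt : (x + width * (k : Int)).toNat < bs.length := by omega
  rw [List.getElem?_eq_getElem hlt, List.getD_eq_getElem?_getD, List.getElem?_eq_getElem hlt]
  rfl

lemma pv_colA_eq (bs : List Int) (width h_ x : Int)
    (hw : 0 < width) (hh : 0 < h_) (hx : 0 ≤ x) (hxw : x < width)
    (hlen : width * h_ ≤ (bs.length : Int)) :
    ((PySem.List.pyRange 0 h_ 1).reverse).flatMap
        (fun y => [PySem.List.pyGetD bs (y * width + x) 0])
      = pvCol bs x (width * h_) width := by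
  unfold pvCol
  rw [pv_slice_strided bs width h_ x hw hh hx hxw hlen]
  rw [Option.getD_some, ← List.map_reverse, pv_pyRange_cast, ← List.map_reverse,
      List.flatMap_map, pv_flatMap_single]
  refine List.map_congr_left ?_
  intro k _
  have hnn : 0 ≤ (k : Int) * width + x := by
    have : 0 ≤ (k : Int) * width := mul_nonneg (Int.natCast_nonneg k) hw.le
    omega
  rw [pv_pyGetD_toNat bs _ hnn]
  have h2 : (k : Int) * width + x = x + width * (k : Int) := by ring
  rw [h2]

lemma pv_colA_eq_mask (bs m : List Int) (width h_ x : Int)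
    (hw : 0 < width) (hh : 0 < h_) (hx : 0 ≤ x) (hxw : x < width)
    (hlen : width * h_ ≤ (bs.length : Int)) (hlenm : width * h_ ≤ (m.length : Int)) :
    ((PySem.List.pyRange 0 h_ 1).reverse).flatMap
        (fun y => [PySem.List.pyGetD bs (y * width + x) 0,
                   PySem.List.pyGetD m (y * width + x) 0])
      = pvInterleave (pvCol bs x (width * h_) width) (pvCol m x (width * h_) width) := by
  unfold pvCol
  rw [pv_slice_strided bs width h_ x hw hh hx hxw hlen,
      pv_slice_strided m width h_ x hw hh hx hxw hlenm]
  rw [Option.getD_some, Option.getD_some, ← List.map_reverse, ← List.map_reverse,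
      pv_interleave_map, pv_pyRange_cast, ← List.map_reverse, List.flatMap_map]
  refine pv_flatMap_congr _ _ _ ?_
  intro k _
  have hnn : 0 ≤ (k : Int) * width + x := by
    have : 0 ≤ (k : Int) * width := mul_nonneg (Int.natCast_nonneg k) hw.le
    omega
  rw [pv_pyGetD_toNat bs _ hnn, pv_pyGetD_toNat m _ hnn]
  have e : ((k : Int) * width + x).toNat = (x + width * (k : Int)).toNat := by
    have h2 : (k : Int) * width + x = x + width * (k : Int) := by ring
    rw [h2]
  rw [e]

lemma pv_foldl_const {α β : Type} (l : List α) (i : β) : l.foldl (fun s _ => s) i = i := by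
  induction l generalizing i with
  | nil => rfl
  | cons a t ih => simpa using ih i

lemma pv_Ainner_eq (bs : List Int) (mb : Option (List Int)) (mt : Bool) (width h_ x : Int)
    (scr : List Int) :
    pvAInner bs mb mt width h_ x scr
      = scr ++ ((PySem.List.pyRange 0 h_ 1).reverse).flatMap (fun y =>
          if mt then [PySem.List.pyGetD bs (y * width + x) 0,
                      PySem.List.pyGetD (mb.getD []) (y * width + x) 0]
          else [PySem.List.pyGetD bs (y * width + x) 0]) := by
  unfold pvAInner
  rw [show (fun (scr : List Int) (y : Int) =>
        let i := y * width + x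
        let scr := scr ++ [PySem.List.pyGetD bs i 0]
        if mt then scr ++ [PySem.List.pyGetD (mb.getD []) i 0] else scr)
      = fun (scr : List Int) (y : Int) => scr ++
          (if mt then [PySem.List.pyGetD bs (y * width + x) 0,
                       PySem.List.pyGetD (mb.getD []) (y * width + x) 0]
           else [PySem.List.pyGetD bs (y * width + x) 0]) from ?_]
  · exact PySem.List.foldl_append_eq_flatMap _ _ _
  · funext scr y; cases mt <;> simp

-- one whole buffer of A equals one pvCols of B
lemma pv_buff_eq (bs : List Int) (mb : Option (List Int)) (width h_ : Int)
    (hw : 0 < width) (hh : 0 < h_) (hlen : width * h_ ≤ (bs.length : Int))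
    (hmok : pvMaskOk (width * h_) mb = true) :
    pvABuf bs mb (pvTruthy mb) width h_ = pvCols bs (width * h_) width mb := by
  simp only [pvABuf, pvCols]
  rw [PySem.List.foldl_congr_mem _ _
        (fun buff x => buff ++ ((PySem.List.pyRange 0 h_ 1).reverse).flatMap (fun y =>
          if pvTruthy mb
          then [PySem.List.pyGetD bs (y * width + x) 0,
                PySem.List.pyGetD (mb.getD []) (y * width + x) 0]
          else [PySem.List.pyGetD bs (y * width + x) 0])) _
        (fun acc x _ => by exact pv_Ainner_eq bs mb (pvTruthy mb) width h_ x acc)]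
  rw [PySem.List.foldl_append_eq_flatMap, PySem.List.foldl_append_eq_flatMap]
  refine congrArg _ (pv_flatMap_congr _ _ _ ?_)
  intro x hxmem
  have hxb : 0 ≤ x ∧ x < width := by
    rw [pv_pyRange_cast] at hxmem
    obtain ⟨k, hk, rfl⟩ := List.mem_map.mp hxmem
    have := List.mem_range.mp hk
    constructor
    · exact Int.natCast_nonneg k
    · omega
  rcases mb with _ | m
  · simpa [pvTruthy] using pv_colA_eq bs width h_ x hw hh hxb.1 hxb.2 hlen
  · rcases m with _ | ⟨a, t⟩
    · simpa [pvTruthy] using pv_colA_eq bs width h_ x hw hh hxb.1 hxb.2 hlen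
    · have hlenm : width * h_ ≤ (((a :: t) : List Int).length : Int) := by
        simp [pvMaskOk] at hmok
        exact_mod_cast hmok
      simpa [pvTruthy] using pv_colA_eq_mask bs (a :: t) width h_ x hw hh hxb.1 hxb.2 hlen hlenm

-- ===== VERDICT (by name: the statement is the Claim_ definition above) =====
theorem SpriteDataBB_spec : Claim_equal_SpriteDataBB := by
  intro b1 b2 b3 w h_ mb _dom hpre
  unfold Spec_SpriteDataBB SpriteDataBB SpriteDataBB_alt
  by_cases hcase : PySem.Int.floordiv w 8 ≤ 0 ∨ h_ ≤ 0
  · rw [if_pos hcase]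
    have hbuf : ∀ bs, pvABuf bs mb (pvTruthy mb) (PySem.Int.floordiv w 8) h_ = [] := by
      intro bs
      unfold pvABuf
      rcases hcase with hw | hh
      · rw [pv_pyRange_cast, show (PySem.Int.floordiv w 8).toNat = 0 by omega]
        rfl
      · have hr : PySem.List.pyRange 0 h_ 1 = [] := by
          rw [pv_pyRange_cast, show h_.toNat = 0 by omega]; rfl
        calc (PySem.List.pyRange 0 (PySem.Int.floordiv w 8) 1).foldl
              (fun scrBuff x => pvAInner bs mb (pvTruthy mb) (PySem.Int.floordiv w 8) h_ x scrBuff) []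
            = (PySem.List.pyRange 0 (PySem.Int.floordiv w 8) 1).foldl (fun s _ => s) [] := by
              refine PySem.List.foldl_congr_mem _ _ _ _ ?_
              intro acc x _
              unfold pvAInner
              rw [hr]
              rfl
          _ = [] := pv_foldl_const _ _
    simp only [List.foldl_cons, List.foldl_nil, List.nil_append]
    rw [hbuf b1, hbuf b2, hbuf b3]
    rfl
  · rw [if_neg hcase]
    have hw : 0 < PySem.Int.floordiv w 8 := by omega
    have hh : 0 < h_ := by omega
    obtain ⟨hl1, hl2, hl3, hmok⟩ := hpre ⟨hw, hh⟩
    simp only [List.foldl_cons, List.foldl_nil, List.nil_append]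
    rw [pv_buff_eq b1 mb (PySem.Int.floordiv w 8) h_ hw hh hl1 hmok,
        pv_buff_eq b2 mb (PySem.Int.floordiv w 8) h_ hw hh hl2 hmok,
        pv_buff_eq b3 mb (PySem.Int.floordiv w 8) h_ hw hh hl3 hmok]
    rfl
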